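-- pv_equiv track=rewrite | github.com/KesterJ/aoc2024 | day_8.py | get_antenna_locations
-- ===== SOURCE A (Python) =====
-- def get_antenna_locations(grid):
--     antenna_dict = {}
--     for i in range(0, len(grid)):
--         for j in range(0, len(grid[i])):
--             current_char = grid[i][j]
--             if current_char != '.':
--                 if current_char in antenna_dict:
--                     antenna_dict[current_char].append([i,j])
--                 else:
--                     antenna_dict[current_char] = [[i,j]]
--     return(antenna_dict)
-- ===== SOURCE B (Python) =====
-- def get_antenna_locations(grid):
--     chars = []
--     for row in grid:
--         for ch in row:
--             if ch != '.' and ch not in chars: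
--                 chars.append(ch)
--     return {c: [[i, j] for i, row in enumerate(grid) for j, ch in enumerate(row) if ch == c]
--             for c in chars}
-- ===== Notes on version B (the rewrite author's own statement) =====
-- stated objective: idiomatic
-- what changed: A builds the dict in a single accumulating pass with a membership test and in-place append per cell; B first collects the distinct antenna characters in first-occurrence order and then builds the result as a dict comprehension that rescans the whole grid once per character.
import Mathlib
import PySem

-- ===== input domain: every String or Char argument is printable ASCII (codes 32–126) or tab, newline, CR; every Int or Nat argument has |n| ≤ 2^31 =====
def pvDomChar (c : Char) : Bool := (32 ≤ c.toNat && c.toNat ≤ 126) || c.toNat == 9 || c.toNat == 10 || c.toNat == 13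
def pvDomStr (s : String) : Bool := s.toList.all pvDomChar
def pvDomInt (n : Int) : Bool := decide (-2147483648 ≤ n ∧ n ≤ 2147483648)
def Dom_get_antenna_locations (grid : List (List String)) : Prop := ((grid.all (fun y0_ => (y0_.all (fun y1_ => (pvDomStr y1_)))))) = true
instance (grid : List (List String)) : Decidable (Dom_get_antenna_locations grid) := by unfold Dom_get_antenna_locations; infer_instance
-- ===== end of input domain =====

-- B replaces A's single accumulating dict pass by first collecting the distinct antenna
-- characters and then rescanning the grid once per character (objective: idiomatic).

-- ===== PORT A =====
def get_antenna_locations (grid : List (List String)) : List (String × List (List Int)) :=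
  ((PySem.List.pyRange 0 grid.length 1).foldl (fun d i =>
    (PySem.List.pyRange 0 (PySem.List.pyGetD grid i []).length 1).foldl (fun d j =>
      let c := PySem.List.pyGetD (PySem.List.pyGetD grid i []) j ""
      if c ≠ "." then
        if d.contains c then
          d.insert c (d.getD c [] ++ [[i, j]])
        else
          d.insert c [[i, j]]
      else d) d) PySem.Dict.empty).items

-- ===== PORT B =====
def get_antenna_locations_alt (grid : List (List String)) : List (String × List (List Int)) :=
  let chars := grid.foldl (fun acc row => row.foldl (fun acc ch =>
      if ch ≠ "." ∧ ch ∉ acc then acc ++ [ch] else acc) acc) []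
  chars.map (fun c => (c, (PySem.List.enumerate grid 0).flatMap (fun p =>
      (PySem.List.enumerate p.2 0).filterMap (fun q =>
        if q.2 = c then some [p.1, q.1] else none))))

-- ===== PRECONDITION & SPEC =====
def Spec_get_antenna_locations (grid : List (List String)) (out : List (String × List (List Int))) : Prop := out = get_antenna_locations_alt grid
instance (grid : List (List String)) (out : List (String × List (List Int))) : Decidable (Spec_get_antenna_locations grid out) := by unfold Spec_get_antenna_locations; infer_instance

-- ===== CLAIM (what is proved, stated in full; the proofs are below) =====
def Claim_equal_get_antenna_locations : Prop := ∀ (grid : List (List String)), Dom_get_antenna_locations grid → Spec_get_antenna_locations grid (get_antenna_locations grid)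

-- ===== LEMMAS AND PROOFS =====

-- the grid flattened to (row index, column index, character) cells, in reading order
def pvCells (grid : List (List String)) : List (Int × Int × String) :=
  (PySem.List.enumerate grid 0).flatMap (fun p =>
    (PySem.List.enumerate p.2 0).map (fun q => (p.1, q.1, q.2)))

-- first occurrences of the non-'.' characters, from accumulator acc
def pvFirstsAcc (acc : List String) (cs : List (Int × Int × String)) : List String :=
  cs.foldl (fun acc t => if t.2.2 ≠ "." ∧ t.2.2 ∉ acc then acc ++ [t.2.2] else acc) acc

-- the coordinate pairs of character c, in order
def pvOcc (c : String) (cs : List (Int × Int × String)) : List (List Int) :=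
  cs.filterMap (fun t => if t.2.2 = c then some [t.1, t.2.1] else none)

-- A's per-cell dict update
def pvStepA (d : PySem.Dict String (List (List Int))) (t : Int × Int × String) :
    PySem.Dict String (List (List Int)) :=
  if t.2.2 ≠ "." then
    if d.contains t.2.2 then d.insert t.2.2 (d.getD t.2.2 [] ++ [[t.1, t.2.1]])
    else d.insert t.2.2 [[t.1, t.2.1]]
  else d

-- the dict that A has built after processing the cells `done`
def pvMkD (done : List (Int × Int × String)) : PySem.Dict String (List (List Int)) :=
  PySem.Dict.mk ((pvFirstsAcc [] done).map (fun c => (c, pvOcc c done)))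

theorem pvFirstsAcc_append (acc : List String) (xs ys : List (Int × Int × String)) :
    pvFirstsAcc acc (xs ++ ys) = pvFirstsAcc (pvFirstsAcc acc xs) ys := by
  simp [pvFirstsAcc, List.foldl_append]

theorem pvFirstsAcc_cons (acc : List String) (t : Int × Int × String)
    (cs : List (Int × Int × String)) :
    pvFirstsAcc acc (t :: cs)
      = pvFirstsAcc (if t.2.2 ≠ "." ∧ t.2.2 ∉ acc then acc ++ [t.2.2] else acc) cs := rfl

theorem mem_pvFirstsAcc (x : String) (cs : List (Int × Int × String)) :
    ∀ acc, x ∈ pvFirstsAcc acc cs ↔ x ∈ acc ∨ (x ≠ "." ∧ ∃ t ∈ cs, t.2.2 = x) := by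
  induction cs with
  | nil => intro acc; simp [pvFirstsAcc]
  | cons t cs ih =>
    intro acc
    rw [pvFirstsAcc_cons, ih]
    by_cases h1 : t.2.2 ≠ "." ∧ t.2.2 ∉ acc
    · rw [if_pos h1]
      constructor
      · rintro (hx | ⟨hne, u, hu, he⟩)
        · rcases List.mem_append.1 hx with hx | hx
          · exact Or.inl hx
          · have : x = t.2.2 := by simpa using hx
            exact Or.inr ⟨this ▸ h1.1, t, List.mem_cons_self .., this.symm⟩
        · exact Or.inr ⟨hne, u, List.mem_cons_of_mem _ hu, he⟩
      · rintro (hx | ⟨hne, u, hu, he⟩)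
        · exact Or.inl (List.mem_append.2 (Or.inl hx))
        · rcases List.mem_cons.1 hu with hu | hu
          · exact Or.inl (List.mem_append.2 (Or.inr (by simp [hu ▸ he.symm])))
          · exact Or.inr ⟨hne, u, hu, he⟩
    · rw [if_neg h1]
      rw [not_and_or, not_not, not_not] at h1
      constructor
      · rintro (hx | ⟨hne, u, hu, he⟩)
        · exact Or.inl hx
        · exact Or.inr ⟨hne, u, List.mem_cons_of_mem _ hu, he⟩
      · rintro (hx | ⟨hne, u, hu, he⟩)
        · exact Or.inl hx
        · rcases List.mem_cons.1 hu with hu | hu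
          · rcases h1 with h1 | h1
            · exact absurd ((hu ▸ he : t.2.2 = x) ▸ h1) hne
            · exact Or.inl ((hu ▸ he : t.2.2 = x) ▸ h1)
          · exact Or.inr ⟨hne, u, hu, he⟩

theorem ne_dot_of_mem_pvFirsts {x : String} {cs : List (Int × Int × String)}
    (h : x ∈ pvFirstsAcc [] cs) : x ≠ "." := by
  rcases (mem_pvFirstsAcc x cs []).1 h with h | h
  · simp at h
  · exact h.1

theorem nodup_pvFirstsAcc (cs : List (Int × Int × String)) :
    ∀ acc : List String, acc.Nodup → (pvFirstsAcc acc cs).Nodup := by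
  induction cs with
  | nil => intro acc h; exact h
  | cons t cs ih =>
    intro acc h
    rw [pvFirstsAcc_cons]
    by_cases h1 : t.2.2 ≠ "." ∧ t.2.2 ∉ acc
    · rw [if_pos h1]
      refine ih _ (List.Nodup.append h (List.nodup_singleton _) ?_)
      intro a ha hb
      exact h1.2 ((List.mem_singleton.1 hb) ▸ ha)
    · rw [if_neg h1]; exact ih _ h

theorem pvOcc_append (c : String) (xs ys : List (Int × Int × String)) :
    pvOcc c (xs ++ ys) = pvOcc c xs ++ pvOcc c ys := by
  simp [pvOcc]

theorem pvOcc_singleton (c : String) (t : Int × Int × String) :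
    pvOcc c [t] = if t.2.2 = c then [[t.1, t.2.1]] else [] := by
  by_cases h : t.2.2 = c <;> simp [pvOcc, h]

theorem pvOcc_eq_nil {c : String} {cs : List (Int × Int × String)}
    (hne : c ≠ ".") (h : c ∉ pvFirstsAcc [] cs) : pvOcc c cs = [] := by
  rw [pvOcc, List.filterMap_eq_nil_iff]
  intro t ht
  rw [if_neg]
  intro he
  exact h ((mem_pvFirstsAcc c cs []).2 (Or.inr ⟨hne, t, ht, he⟩))

theorem pvMkD_keys (done : List (Int × Int × String)) :
    (pvMkD done).keys = pvFirstsAcc [] done := by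
  have hid : ((fun x : String × List (List Int) => x.1) ∘ fun c => (c, pvOcc c done)) = id := rfl
  rw [pvMkD, PySem.Dict.keys_mk, List.map_map, hid, List.map_id]

theorem pvMkD_contains (done : List (Int × Int × String)) (c : String) :
    (pvMkD done).contains c = decide (c ∈ pvFirstsAcc [] done) := by
  rw [PySem.Dict.contains_eq_decide_mem_keys, pvMkD_keys]

theorem pvMkD_getD {done : List (Int × Int × String)} {c : String}
    (h : c ∈ pvFirstsAcc [] done) : (pvMkD done).getD c [] = pvOcc c done := by
  refine PySem.Dict.getD_of_mem_items _ ?_ ?_ []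
  · exact List.mem_map.2 ⟨c, h, rfl⟩
  · rw [pvMkD_keys]; exact nodup_pvFirstsAcc done [] List.nodup_nil

theorem pvStepA_mkD (done : List (Int × Int × String)) (t : Int × Int × String) :
    pvStepA (pvMkD done) t = pvMkD (done ++ [t]) := by
  obtain ⟨i, j, c⟩ := t
  have hF' : pvFirstsAcc [] (done ++ [(i, j, c)])
      = if c ≠ "." ∧ c ∉ pvFirstsAcc [] done then pvFirstsAcc [] done ++ [c]
        else pvFirstsAcc [] done := by
    rw [pvFirstsAcc_append, pvFirstsAcc_cons]; rfl
  by_cases hdot : c ≠ "."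
  · by_cases hmem : c ∈ pvFirstsAcc [] done
    · -- existing key: in-place update
      rw [pvStepA, if_pos hdot, pvMkD_contains, if_pos (by simpa using hmem),
        pvMkD_getD hmem]
      apply PySem.Dict.ext
      rw [PySem.Dict.items_insert_of_contains _ _ (by rw [pvMkD_contains]; simpa using hmem)]
      show ((pvFirstsAcc [] done).map _).map _ = _
      rw [List.map_map, pvMkD, hF', if_neg (by simp [hmem])]
      show _ = List.map _ (pvFirstsAcc [] done)
      apply List.map_congr_left
      intro x hx
      by_cases hxc : x = c
      · subst hxc
        simp [pvOcc_append, pvOcc_singleton]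
      · have : (x == c) = false := by simp [hxc]
        simp [Function.comp, this, pvOcc_append, pvOcc_singleton, Ne.symm hxc]
    · -- fresh key: append
      rw [pvStepA, if_pos hdot, pvMkD_contains, if_neg (by simpa using hmem)]
      apply PySem.Dict.ext
      rw [PySem.Dict.items_insert_of_not_contains _ _ (by rw [pvMkD_contains]; simpa using hmem)]
      show (pvFirstsAcc [] done).map _ ++ _ = _
      rw [pvMkD, hF', if_pos ⟨hdot, hmem⟩]
      show _ = List.map _ (pvFirstsAcc [] done ++ [c])
      rw [List.map_append]
      congr 1
      · apply List.map_congr_left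
        intro x hx
        have hxc : c ≠ x := fun h => hmem (h ▸ hx)
        simp [pvOcc_append, pvOcc_singleton, hxc]
      · simp [pvOcc_append, pvOcc_singleton, pvOcc_eq_nil hdot hmem]
  · -- a '.': nothing changes
    rw [pvStepA, if_neg hdot]
    have hc : c = "." := not_not.1 hdot
    apply PySem.Dict.ext
    show (pvFirstsAcc [] done).map _ = _
    rw [pvMkD, hF', if_neg (by simp [hc])]
    apply List.map_congr_left
    intro x hx
    have : c ≠ x := fun h => ne_dot_of_mem_pvFirsts hx (h.symm.trans hc)
    simp [pvOcc_append, pvOcc_singleton, this]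

theorem pvFoldA (cs : List (Int × Int × String)) :
    ∀ done, cs.foldl pvStepA (pvMkD done) = pvMkD (done ++ cs) := by
  induction cs with
  | nil => intro done; simp
  | cons t cs ih =>
    intro done
    rw [List.foldl_cons, pvStepA_mkD, ih]
    simp

-- A's nested index loops are the fold of pvStepA over the flattened cells
theorem pvA_eq (grid : List (List String)) :
    get_antenna_locations grid = ((pvCells grid).foldl pvStepA PySem.Dict.empty).items := by
  rw [pvCells, List.foldl_flatMap]
  rw [PySem.List.enumerate_eq_map_pyRange grid [], List.foldl_map]
  rw [get_antenna_locations]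
  congr 1
  apply PySem.List.foldl_congr_mem
  intro d i _
  rw [PySem.List.enumerate_eq_map_pyRange (PySem.List.pyGetD grid i []) "", List.foldl_map,
    List.foldl_map]
  rfl

-- folding a function of the element only over enumerate is folding over the list
theorem pvFoldl_enumerate_snd {α β : Type} (l : List α) (f : β → α → β) :
    ∀ (s : Int) (acc : β),
      (PySem.List.enumerate l s).foldl (fun acc q => f acc q.2) acc = l.foldl f acc := by
  induction l with
  | nil => intro s acc; simp [PySem.List.enumerate_nil]
  | cons x l ih => intro s acc; rw [PySem.List.enumerate_cons, List.foldl_cons, ih, List.foldl_cons]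

-- B's two phases, expressed over the flattened cells
theorem pvB_eq (grid : List (List String)) :
    get_antenna_locations_alt grid
      = (pvFirstsAcc [] (pvCells grid)).map (fun c => (c, pvOcc c (pvCells grid))) := by
  rw [get_antenna_locations_alt]
  have step1 : ∀ (p : Int × List String) (acc : List String),
      ((PySem.List.enumerate p.2 0).map (fun q => (p.1, q.1, q.2))).foldl
        (fun acc t => if t.2.2 ≠ "." ∧ t.2.2 ∉ acc then acc ++ [t.2.2] else acc) acc
      = p.2.foldl (fun acc ch => if ch ≠ "." ∧ ch ∉ acc then acc ++ [ch] else acc) acc := by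
    intro p acc
    rw [List.foldl_map]
    exact pvFoldl_enumerate_snd p.2
      (fun acc ch => if ch ≠ "." ∧ ch ∉ acc then acc ++ [ch] else acc) 0 acc
  have hchars : pvFirstsAcc [] (pvCells grid)
      = grid.foldl (fun acc row => row.foldl (fun acc ch =>
          if ch ≠ "." ∧ ch ∉ acc then acc ++ [ch] else acc) acc) [] := by
    rw [pvFirstsAcc, pvCells, List.foldl_flatMap]
    rw [PySem.List.foldl_congr_mem _ _ _ _ (fun acc p _ => step1 p acc)]
    exact pvFoldl_enumerate_snd grid
      (fun acc row => row.foldl (fun acc ch =>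
        if ch ≠ "." ∧ ch ∉ acc then acc ++ [ch] else acc) acc) 0 []
  rw [← hchars]
  apply List.map_congr_left
  intro c _
  rw [pvOcc, pvCells, List.filterMap_flatMap]
  simp only [List.filterMap_map, Function.comp]

-- ===== VERDICT (by name: the statement is the Claim_ definition above) =====
theorem get_antenna_locations_spec : Claim_equal_get_antenna_locations := by
  intro grid _
  show get_antenna_locations grid = get_antenna_locations_alt grid
  rw [pvA_eq, pvB_eq]
  have : PySem.Dict.empty = pvMkD [] := rfl
  rw [this, pvFoldA, List.nil_append]
  rfl
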